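-- pv_equiv track=rewrite | github.com/KhelKim/The-core-algorithm-with-Python | algorithm/MeetingRoom.py | get_count_list
-- ===== SOURCE A (Python) =====
-- def get_count_list(locations):
--     max_loc = max(locations)
--     min_loc = min(locations)
--     count_list = []
--     for i in range(min_loc, max_loc + 1):
--         count = 0
--         for loc in locations:
--             count += abs(loc - i)
--         count_list.append(count)
--     return count_list
-- ===== SOURCE B (Python) =====
-- def get_count_list(locations):
--     lo = min(locations)
--     hi = max(locations)
--     n = len(locations)
--     freq = {}
--     for x in locations:
--         freq[x] = freq.get(x, 0) + 1
--     cur = 0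
--     for x in locations:
--         cur += x - lo
--     count_list = []
--     le = 0
--     for i in range(lo, hi):
--         count_list.append(cur)
--         le += freq.get(i, 0)
--         cur += 2 * le - n
--     count_list.append(cur)
--     return count_list
-- ===== Notes on version B (the rewrite author's own statement) =====
-- stated objective: faster
-- what changed: B builds a frequency table in one pass and updates the running sum of absolute distances incrementally (cur += 2*count_le - n) while sweeping the positions, instead of A's rescan of all locations at every position.
-- outside the precondition, e.g. on get_count_list([]): A raises ValueError, B raises ValueError
import Mathlib
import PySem

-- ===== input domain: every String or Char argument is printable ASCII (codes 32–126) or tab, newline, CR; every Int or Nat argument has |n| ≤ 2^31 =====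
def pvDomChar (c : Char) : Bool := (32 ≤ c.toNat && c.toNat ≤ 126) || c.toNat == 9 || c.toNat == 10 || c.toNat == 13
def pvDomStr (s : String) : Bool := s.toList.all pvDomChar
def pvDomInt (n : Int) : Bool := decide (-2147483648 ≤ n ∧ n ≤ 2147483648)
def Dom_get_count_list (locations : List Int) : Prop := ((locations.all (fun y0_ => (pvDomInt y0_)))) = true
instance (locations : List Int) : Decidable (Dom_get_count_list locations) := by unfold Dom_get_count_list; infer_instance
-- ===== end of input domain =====

-- B replaces A's per-position rescan (O(R*N), R = max-min+1) by one counting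
-- pass plus an incremental update of the running sum (O(N+R)); objective: faster.

-- ===== PORT A =====
def get_count_list (locations : List Int) : List Int :=
  match PySem.List.max? locations (fun x => x), PySem.List.min? locations (fun x => x) with
  | some max_loc, some min_loc =>
      (PySem.List.pyRange min_loc (max_loc + 1) 1).foldl
        (fun count_list i =>
          count_list ++ [locations.foldl (fun count loc => count + |loc - i|) 0]) []
  | _, _ => []

-- ===== PORT B =====
-- freq = {}; for x in locations: freq[x] = freq.get(x, 0) + 1
def pvFreq (locations : List Int) : PySem.Dict Int Int :=
  locations.foldl (fun d x => d.modify x 0 (· + 1)) PySem.Dict.empty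

-- one iteration of B's main loop; state = (count_list, cur, le)
def pvStepB (freq : PySem.Dict Int Int) (n : Int)
    (s : List Int × Int × Int) (i : Int) : List Int × Int × Int :=
  let le := s.2.2 + freq.getD i 0
  (s.1 ++ [s.2.1], s.2.1 + (2 * le - n), le)

def get_count_list_alt (locations : List Int) : List Int :=
  match PySem.List.min? locations (fun x => x) with
  | none => []
  | some lo =>
    match PySem.List.max? locations (fun x => x) with
    | none => []
    | some hi =>
        let n : Int := locations.length
        let freq := pvFreq locations
        let cur0 := locations.foldl (fun c x => c + (x - lo)) 0
        let s := (PySem.List.pyRange lo hi 1).foldl (pvStepB freq n) ([], cur0, 0)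
        s.1 ++ [s.2.1]

-- ===== PRECONDITION & SPEC =====
-- Python's max()/min() raise ValueError on the empty list (B's min() raises too).
def Pre_get_count_list (locations : List Int) : Prop := locations ≠ []
instance (locations : List Int) : Decidable (Pre_get_count_list locations) := by
  unfold Pre_get_count_list; infer_instance

def pvWitness_get_count_list : List Int := [2, 0, 5]

def Spec_get_count_list (locations : List Int) (out : List Int) : Prop := out = get_count_list_alt locations
instance (locations : List Int) (out : List Int) : Decidable (Spec_get_count_list locations out) := by
  unfold Spec_get_count_list; infer_instance

-- ===== CLAIM (what is proved, stated in full; the proofs are below) =====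
def Claim_equal_get_count_list : Prop := ∀ (locations : List Int), Dom_get_count_list locations → Pre_get_count_list locations → Spec_get_count_list locations (get_count_list locations)

-- ===== LEMMAS AND PROOFS =====

-- Σ |x - i| over locations, the value A appends at position i
def pvS (locations : List Int) (i : Int) : Int :=
  (locations.map (fun x => |x - i|)).sum

-- number of elements strictly below j, as an Int
def pvL (locations : List Int) (j : Int) : Int :=
  ((locations.countP fun x => decide (x < j)) : Int)

theorem pvFoldAbs (locations : List Int) (i : Int) :
    ∀ init : Int, locations.foldl (fun c loc => c + |loc - i|) init = init + pvS locations i := by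
  induction locations with
  | nil => intro init; simp [pvS]
  | cons x t ih => intro init; simp only [List.foldl_cons, ih, pvS, List.map_cons, List.sum_cons]; ring

theorem pvFoldShift (locations : List Int) (lo : Int) :
    ∀ init : Int, locations.foldl (fun c x => c + (x - lo)) init
      = init + (locations.map (fun x => x - lo)).sum := by
  induction locations with
  | nil => intro init; simp
  | cons x t ih => intro init; simp only [List.foldl_cons, ih, List.map_cons, List.sum_cons]; ring

theorem pvCur0 (locations : List Int) (lo : Int) (h : ∀ x ∈ locations, lo ≤ x) :
    (locations.map (fun x => x - lo)).sum = pvS locations lo := by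
  unfold pvS
  induction locations with
  | nil => simp
  | cons x t ih =>
      simp only [List.map_cons, List.sum_cons]
      rw [ih (fun y hy => h y (List.mem_cons_of_mem _ hy)),
        abs_of_nonneg (by have := h x (List.mem_cons_self) ; omega)]

theorem pvAbsStep (x j : Int) : |x - (j + 1)| = |x - j| + (if x < j + 1 then (2 : Int) else 0) - 1 := by
  by_cases h : x ≤ j
  · rw [abs_of_nonpos (by omega), abs_of_nonpos (by omega), if_pos (by omega)]; ring
  · rw [abs_of_nonneg (by omega), abs_of_nonneg (by omega), if_neg (by omega)]; ring

theorem pvSRec (locations : List Int) (j : Int) :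
    pvS locations (j + 1) = pvS locations j + 2 * pvL locations (j + 1) - locations.length := by
  induction locations with
  | nil => simp [pvS, pvL]
  | cons x t ih =>
      by_cases h : x < j + 1 <;>
        simp [pvS, pvL, pvAbsStep, List.countP_cons] at ih ⊢ <;> omega

theorem pvLRec (locations : List Int) (j : Int) :
    pvL locations (j + 1) = pvL locations j + locations.count j := by
  induction locations with
  | nil => simp [pvL]
  | cons x t ih =>
      by_cases h2 : x < j <;> by_cases h3 : x = j <;>
        simp [pvL, List.countP_cons, List.count_cons, h2, h3] at ih ⊢ <;> omega

theorem pvFreqCount (locations : List Int) (v : Int) :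
    (pvFreq locations).getD v 0 = locations.count v := by
  unfold pvFreq
  rw [PySem.Dict.getD_foldl_modify_add_one]
  simp [PySem.Dict.empty, PySem.Dict.getD, PySem.Dict.get?]

-- A's append-loop over the range is just a map
theorem pvFoldAppendMap (f : Int → Int) (l : List Int) :
    ∀ acc : List Int, l.foldl (fun cl i => cl ++ [f i]) acc = acc ++ l.map f := by
  induction l with
  | nil => intro acc; simp
  | cons x t ih => intro acc; simp [ih]

-- invariant of B's main loop
theorem pvLoopInv (locations : List Int) (n : Nat) :
    ∀ a b : Int, (b - a).toNat = n → a ≤ b → ∀ out0 : List Int,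
      (PySem.List.pyRange a b 1).foldl (pvStepB (pvFreq locations) locations.length)
          (out0, pvS locations a, pvL locations a)
        = (out0 ++ (PySem.List.pyRange a b 1).map (pvS locations),
           pvS locations b, pvL locations b) := by
  induction n with
  | zero =>
      intro a b h hab out0
      have : b = a := by omega
      subst this
      simp [PySem.List.pyRange_one_eq_nil le_rfl]
  | succ k ih =>
      intro a b h hab out0
      have hlt : a < b := by omega
      rw [PySem.List.pyRange_one_cons hlt]
      simp only [List.foldl_cons, List.map_cons, pvStepB]
      have hle : pvL locations a + (pvFreq locations).getD a 0 = pvL locations (a + 1) := by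
        rw [pvFreqCount, pvLRec]
      have hcur : pvS locations a + (2 * (pvL locations a + (pvFreq locations).getD a 0)
          - (locations.length : Int)) = pvS locations (a + 1) := by
        rw [hle, pvSRec]; ring
      rw [hcur, hle, ih (a + 1) b (by omega) (by omega)]
      simp

-- ===== VERDICT (by name: the statement is the Claim_ definition above) =====
theorem get_count_list_spec : Claim_equal_get_count_list := by
  intro locations _ hpre
  obtain ⟨x, t, rfl⟩ : ∃ x t, locations = x :: t := by
    cases locations with
    | nil => exact absurd rfl hpre
    | cons x t => exact ⟨x, t, rfl⟩
  unfold Spec_get_count_list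
  have hmaxe : PySem.List.max? (x :: t) (fun y => y) = some (t.foldl max x) :=
    PySem.List.max?_id_cons x t
  have hmine : PySem.List.min? (x :: t) (fun y => y) = some (t.foldl min x) :=
    PySem.List.min?_id_cons x t
  set locs := x :: t with hlocs
  set lo := t.foldl min x with hlo
  set hi := t.foldl max x with hhi
  have hmin : ∀ y ∈ locs, lo ≤ y := fun y hy =>
    PySem.List.min?_isMin (xs := locs) (key := fun z => z) hmine y hy
  have hmax : ∀ y ∈ locs, y ≤ hi := fun y hy =>
    PySem.List.max?_isMax (xs := locs) (key := fun z => z) hmaxe y hy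
  have hlohi : lo ≤ hi := by
    have h1 := hmin x List.mem_cons_self
    have h2 := hmax x List.mem_cons_self
    omega
  have hf : (fun i => locs.foldl (fun count loc => count + |loc - i|) 0) = pvS locs := by
    funext i; rw [pvFoldAbs]; ring
  have hcur0 : locs.foldl (fun c y => c + (y - lo)) 0 = pvS locs lo := by
    rw [pvFoldShift, pvCur0 locs lo hmin]; ring
  have hL0 : pvL locs lo = 0 := by
    unfold pvL
    have : locs.countP (fun y => decide (y < lo)) = 0 := by
      rw [List.countP_eq_zero]
      intro y hy
      simpa using not_lt.mpr (hmin y hy)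
    rw [this]; rfl
  have hB := pvLoopInv locs (hi - lo).toNat lo hi rfl hlohi []
  rw [hL0] at hB
  simp only [get_count_list, get_count_list_alt, hmaxe, hmine]
  rw [pvFoldAppendMap (fun i => locs.foldl (fun count loc => count + |loc - i|) 0), hf,
    hcur0, hB]
  simp only [List.nil_append]
  rw [PySem.List.pyRange_one_succ_right hlohi]
  simp
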